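-- pv_equiv track=rewrite | github.com/caidog-xuqiu/xian-travel | app/services/planner.py | _apply_period_first_stop_bias
-- ===== SOURCE A (Python) =====
-- from typing import Any, Dict, List
--
-- def _apply_period_first_stop_bias(
--     ordered_sights: List[Dict[str, Any]],
--     preferred_clusters: List[str],
-- ) -> List[Dict[str, Any]]:
--     """轻量时间语义偏好：仅调整首站倾向，不做全局重排。"""
--     if not ordered_sights or not preferred_clusters:
--         return ordered_sights
--
--     for cluster in preferred_clusters:
--         for idx, sight in enumerate(ordered_sights):
--             if sight.get("district_cluster") == cluster:
--                 if idx == 0: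
--                     return ordered_sights
--                 adjusted = list(ordered_sights)
--                 adjusted.insert(0, adjusted.pop(idx))
--                 return adjusted
--     return ordered_sights
-- ===== SOURCE B (Python) =====
-- from typing import Any, Dict, List
--
-- def _apply_period_first_stop_bias(
--     ordered_sights: List[Dict[str, Any]],
--     preferred_clusters: List[str],
-- ) -> List[Dict[str, Any]]:
--     """Single pass: pick the earliest sight whose cluster has minimal preference rank."""
--     if not ordered_sights or not preferred_clusters:
--         return ordered_sights
--
--     rank = {}
--     for i, cluster in enumerate(preferred_clusters):
--         rank.setdefault(cluster, i)
--
--     best_idx = None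
--     best_rank = None
--     for idx, sight in enumerate(ordered_sights):
--         r = rank.get(sight.get("district_cluster"))
--         if r is not None and (best_rank is None or r < best_rank):
--             best_rank = r
--             best_idx = idx
--
--     if best_idx is None or best_idx == 0:
--         return ordered_sights
--     adjusted = list(ordered_sights)
--     adjusted.insert(0, adjusted.pop(best_idx))
--     return adjusted
-- ===== Notes on version B (the rewrite author's own statement) =====
-- stated objective: faster
-- what changed: Replaces A's nested loops (for each preferred cluster, scan all sights) with a first-occurrence rank table over preferred_clusters plus one pass over the sights tracking the index of minimal rank (strict < keeps the earliest sight of the winning cluster).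
import Mathlib
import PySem

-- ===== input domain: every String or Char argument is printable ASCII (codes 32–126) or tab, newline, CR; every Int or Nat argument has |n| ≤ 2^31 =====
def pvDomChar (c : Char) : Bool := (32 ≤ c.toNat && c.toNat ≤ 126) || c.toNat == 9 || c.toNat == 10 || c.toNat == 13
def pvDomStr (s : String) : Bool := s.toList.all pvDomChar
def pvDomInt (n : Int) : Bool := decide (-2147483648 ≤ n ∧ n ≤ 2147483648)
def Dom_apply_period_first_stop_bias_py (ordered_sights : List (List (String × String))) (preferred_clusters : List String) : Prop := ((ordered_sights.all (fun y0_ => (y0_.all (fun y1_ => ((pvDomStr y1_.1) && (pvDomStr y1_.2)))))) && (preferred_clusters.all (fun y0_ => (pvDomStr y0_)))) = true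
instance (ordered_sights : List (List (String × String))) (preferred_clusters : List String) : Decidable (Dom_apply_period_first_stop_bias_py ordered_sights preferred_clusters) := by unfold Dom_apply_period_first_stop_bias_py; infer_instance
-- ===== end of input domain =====

-- B replaces A's nested cluster-by-cluster scans with a rank table plus one
-- argmin pass over the sights (objective: faster, asymptotically fewer scans).

-- ===== PORT A =====
-- inner loop: 'for idx, sight in enumerate(ordered_sights): if sight.get("district_cluster") == cluster: …'
def pvA_inner (orig : List (List (String × String))) (cluster : String) :
    List (List (String × String)) → Nat → Option (List (List (String × String)))
  | [], _ => none
  | s :: rest, idx =>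
    if (PySem.Dict.mk s).get? "district_cluster" = some cluster then
      some (if idx = 0 then orig
            else
              -- adjusted = list(ordered_sights); adjusted.insert(0, adjusted.pop(idx))
              match PySem.List.pop? orig (idx : Int) with
              | some (x, r) => PySem.List.insert r 0 x
              | none => orig)
    else pvA_inner orig cluster rest (idx + 1)

-- outer loop: 'for cluster in preferred_clusters: …'
def pvA_outer (orig : List (List (String × String))) :
    List String → List (List (String × String))
  | [] => orig
  | c :: cs =>
    match pvA_inner orig c orig 0 with
    | some res => res
    | none => pvA_outer orig cs

def apply_period_first_stop_bias_py (ordered_sights : List (List (String × String))) (preferred_clusters : List String) : List (List (String × String)) :=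
  if ordered_sights = [] ∨ preferred_clusters = [] then ordered_sights
  else pvA_outer ordered_sights preferred_clusters

-- ===== PORT B =====
-- 'for i, cluster in enumerate(preferred_clusters): rank.setdefault(cluster, i)'
def pvB_rank : List String → Nat → PySem.Dict String Nat → PySem.Dict String Nat
  | [], _, d => d
  | c :: cs, i, d => pvB_rank cs (i + 1) (d.setdefault c i)

-- 'for idx, sight in enumerate(ordered_sights): r = rank.get(sight.get("district_cluster")); …'
def pvB_best (rank : PySem.Dict String Nat) :
    List (List (String × String)) → Nat → Option (Nat × Nat) → Option (Nat × Nat)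
  | [], _, best => best
  | s :: rest, idx, best =>
    let r : Option Nat :=
      match (PySem.Dict.mk s).get? "district_cluster" with
      | some v => rank.get? v
      | none => none   -- rank.get(None): None is never a key of rank
    let best' : Option (Nat × Nat) :=
      match r, best with
      | some rv, none => some (rv, idx)
      | some rv, some (br, bi) => if rv < br then some (rv, idx) else some (br, bi)
      | none, b => b
    pvB_best rank rest (idx + 1) best'

def apply_period_first_stop_bias_py_alt (ordered_sights : List (List (String × String))) (preferred_clusters : List String) : List (List (String × String)) :=
  if ordered_sights = [] ∨ preferred_clusters = [] then ordered_sights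
  else
    let rank := pvB_rank preferred_clusters 0 PySem.Dict.empty
    match pvB_best rank ordered_sights 0 none with
    | none => ordered_sights
    | some (_, bi) =>
      if bi = 0 then ordered_sights
      else
        match PySem.List.pop? ordered_sights (bi : Int) with
        | some (x, r) => PySem.List.insert r 0 x
        | none => ordered_sights

-- ===== PRECONDITION & SPEC =====
def Spec_apply_period_first_stop_bias_py (ordered_sights : List (List (String × String))) (preferred_clusters : List String) (out : List (List (String × String))) : Prop := out = apply_period_first_stop_bias_py_alt ordered_sights preferred_clusters
instance (ordered_sights : List (List (String × String))) (preferred_clusters : List String) (out : List (List (String × String))) : Decidable (Spec_apply_period_first_stop_bias_py ordered_sights preferred_clusters out) := by unfold Spec_apply_period_first_stop_bias_py; infer_instance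

-- ===== CLAIM (what is proved, stated in full; the proofs are below) =====
def Claim_equal_apply_period_first_stop_bias_py : Prop := ∀ (ordered_sights : List (List (String × String))) (preferred_clusters : List String), Dom_apply_period_first_stop_bias_py ordered_sights preferred_clusters → Spec_apply_period_first_stop_bias_py ordered_sights preferred_clusters (apply_period_first_stop_bias_py ordered_sights preferred_clusters)

-- ===== LEMMAS AND PROOFS =====

-- the cluster (if any) of one sight
def pvClusterOf (s : List (String × String)) : Option String :=
  (PySem.Dict.mk s).get? "district_cluster"

-- move index j of os to the front (identity at 0), the common tail of both ports
def pvMove (os : List (List (String × String))) (j : Nat) : List (List (String × String)) :=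
  if j = 0 then os
  else
    match PySem.List.pop? os (j : Int) with
    | some (x, r) => PySem.List.insert r 0 x
    | none => os

-- first index ≥ i (offset form) of a sight with cluster c
def pvFindC (c : String) : List (List (String × String)) → Nat → Option Nat
  | [], _ => none
  | s :: rest, i => if pvClusterOf s = some c then some i else pvFindC c rest (i + 1)

-- A's search over the cluster list
def pvAFind (sights : List (List (String × String))) : List String → Option Nat
  | [] => none
  | c :: cs =>
    match pvFindC c sights 0 with
    | some i => some i
    | none => pvAFind sights cs

-- B's argmin fold, parametrised by the key function
def pvSelF (key : List (String × String) → Option Nat) :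
    List (List (String × String)) → Nat → Option (Nat × Nat) → Option (Nat × Nat)
  | [], _, best => best
  | s :: rest, idx, best =>
    let best' : Option (Nat × Nat) :=
      match key s, best with
      | some rv, none => some (rv, idx)
      | some rv, some (br, bi) => if rv < br then some (rv, idx) else some (br, bi)
      | none, b => b
    pvSelF key rest (idx + 1) best'

-- the key a sight gets from the preference list: first-occurrence rank of its cluster
def pvKeyOf (pcs : List String) (s : List (String × String)) : Option Nat :=
  match pvClusterOf s with
  | some v => PySem.List.index? pcs v
  | none => none

theorem pvA_inner_eq (orig : List (List (String × String))) (c : String)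
    (sights : List (List (String × String))) (i : Nat) :
    pvA_inner orig c sights i = (pvFindC c sights i).map (pvMove orig) := by
  induction sights generalizing i with
  | nil => rfl
  | cons s rest ih =>
    simp only [pvA_inner, pvFindC, pvClusterOf]
    by_cases h : (PySem.Dict.mk s).get? "district_cluster" = some c
    · simp [h, pvMove]
    · simp [h, ih]

theorem pvA_outer_eq (os : List (List (String × String))) (pcs : List String) :
    pvA_outer os pcs = match pvAFind os pcs with
      | some j => pvMove os j
      | none => os := by
  induction pcs with
  | nil => rfl
  | cons c cs ih =>
    simp only [pvA_outer, pvAFind, pvA_inner_eq]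
    cases pvFindC c os 0 with
    | none => simpa using ih
    | some j => rfl

theorem pvB_rank_get? (pcs : List String) (i : Nat) (d : PySem.Dict String Nat) (x : String) :
    (pvB_rank pcs i d).get? x =
      match d.get? x with
      | some v => some v
      | none => (PySem.List.index? pcs x).map (· + i) := by
  induction pcs generalizing i d with
  | nil => cases hx : d.get? x <;> simp [pvB_rank, hx]
  | cons c cs ih =>
    simp only [pvB_rank, ih]
    by_cases hc : d.contains c = true
    · rw [PySem.Dict.setdefault_of_contains _ _ hc]
      cases hx : d.get? x with
      | some v => rfl
      | none =>
        have hne : c ≠ x := by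
          intro h; subst h
          rw [PySem.Dict.contains_eq_isSome_get?, hx] at hc; simp at hc
        rw [PySem.List.index?_cons_of_ne _ hne]
        cases PySem.List.index? cs x <;> simp <;> omega
    · rw [PySem.Dict.setdefault_of_not_contains _ _ (by simpa using hc)]
      by_cases hcx : x = c
      · subst hcx
        rw [PySem.Dict.get?_insert_self]
        have hx : d.get? x = none := by
          rw [PySem.Dict.get?_eq_none_iff_contains]; simpa using hc
        rw [hx, PySem.List.index?_cons_self]
        simp
      · rw [PySem.Dict.get?_insert_of_ne _ _ hcx]
        cases hx : d.get? x with
        | some v => rfl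
        | none =>
          rw [PySem.List.index?_cons_of_ne _ (Ne.symm hcx)]
          cases PySem.List.index? cs x <;> simp <;> omega

theorem pvB_best_eq_selF (rank : PySem.Dict String Nat)
    (sights : List (List (String × String))) (i : Nat) (acc : Option (Nat × Nat)) :
    pvB_best rank sights i acc =
      pvSelF (fun s => match pvClusterOf s with
                       | some v => rank.get? v
                       | none => none) sights i acc := by
  induction sights generalizing i acc with
  | nil => rfl
  | cons s rest ih => simp only [pvB_best, pvSelF, pvClusterOf, ih]

theorem pvSelF_congr (k1 k2 : List (String × String) → Option Nat)
    (sights : List (List (String × String))) (i : Nat) (acc : Option (Nat × Nat))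
    (h : ∀ s ∈ sights, k1 s = k2 s) :
    pvSelF k1 sights i acc = pvSelF k2 sights i acc := by
  induction sights generalizing i acc with
  | nil => rfl
  | cons s rest ih =>
    simp only [pvSelF, h s (by simp)]
    exact ih _ _ (fun t ht => h t (by simp [ht]))

theorem pvSelF_none (k : List (String × String) → Option Nat)
    (sights : List (List (String × String))) (i : Nat) (acc : Option (Nat × Nat))
    (h : ∀ s ∈ sights, k s = none) :
    pvSelF k sights i acc = acc := by
  induction sights generalizing i acc with
  | nil => rfl
  | cons s rest ih =>
    simp only [pvSelF, h s (by simp)]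
    exact ih _ _ (fun t ht => h t (by simp [ht]))

theorem pvSelF_zero_acc (k : List (String × String) → Option Nat)
    (sights : List (List (String × String))) (i j : Nat) :
    pvSelF k sights i (some (0, j)) = some (0, j) := by
  induction sights generalizing i with
  | nil => rfl
  | cons s rest ih =>
    simp only [pvSelF]
    cases k s <;> simp [ih]

theorem pvSelF_zero (c : String) (cs : List String)
    (sights : List (List (String × String))) (i p : Nat) (acc : Option (Nat × Nat))
    (hacc : ∀ br bi, acc = some (br, bi) → 0 < br)
    (hf : pvFindC c sights i = some p) :
    pvSelF (pvKeyOf (c :: cs)) sights i acc = some (0, p) := by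
  induction sights generalizing i acc with
  | nil => simp [pvFindC] at hf
  | cons s rest ih =>
    simp only [pvFindC] at hf
    by_cases hs : pvClusterOf s = some c
    · rw [if_pos hs] at hf
      injection hf with hip
      subst hip
      have hkey : pvKeyOf (c :: cs) s = some 0 := by
        unfold pvKeyOf
        rw [hs]
        exact PySem.List.index?_cons_self c cs
      simp only [pvSelF, hkey]
      cases acc with
      | none => exact pvSelF_zero_acc _ _ _ _
      | some q =>
        obtain ⟨br, bi⟩ := q
        have hbr := hacc br bi rfl
        simp only [if_pos hbr]
        exact pvSelF_zero_acc _ _ _ _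
    · rw [if_neg hs] at hf
      simp only [pvSelF]
      apply ih _ _ _ hf
      intro br bi hb
      revert hb
      cases hk : pvKeyOf (c :: cs) s with
      | none =>
        intro hb
        exact hacc br bi hb
      | some rv =>
        have hrv : rv ≠ 0 := by
          intro h0; subst h0
          apply hs
          simp only [pvKeyOf] at hk
          cases hcl : pvClusterOf s with
          | none => simp [hcl] at hk
          | some v =>
            simp only [hcl] at hk
            by_cases hvc : v = c
            · simp [hvc]
            · rw [PySem.List.index?_cons_of_ne _ (fun h => hvc h.symm)] at hk
              cases PySem.List.index? cs v <;> simp at hk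
        cases acc with
        | none => intro hb; simp at hb; omega
        | some q =>
          obtain ⟨br', bi'⟩ := q
          by_cases hlt : rv < br'
          · intro hb; simp [hlt] at hb; omega
          · intro hb
            simp only [if_neg hlt] at hb
            injection hb with hb'
            injection hb' with h1 h2
            subst h1
            exact hacc _ _ rfl

theorem pvSelF_shift (k : List (String × String) → Option Nat)
    (sights : List (List (String × String))) (i : Nat) (acc : Option (Nat × Nat)) :
    pvSelF (fun s => (k s).map (· + 1)) sights i (acc.map (fun p => (p.1 + 1, p.2))) =
      (pvSelF k sights i acc).map (fun p => (p.1 + 1, p.2)) := by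
  induction sights generalizing i acc with
  | nil => rfl
  | cons s rest ih =>
    simp only [pvSelF]
    cases hk : k s with
    | none =>
      simp only [hk, Option.map_none]
      exact ih (i + 1) acc
    | some rv =>
      simp only [hk, Option.map_some]
      cases acc with
      | none =>
        simp only [Option.map_none]
        exact ih (i + 1) (some (rv, i))
      | some q =>
        obtain ⟨br, bi⟩ := q
        simp only [Option.map_some]
        by_cases hlt : rv < br
        · rw [if_pos hlt, if_pos (by omega)]
          exact ih (i + 1) (some (rv, i))
        · rw [if_neg hlt, if_neg (by omega)]
          exact ih (i + 1) (some (br, bi))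

theorem pvMain (pcs : List String) (sights : List (List (String × String))) :
    (pvSelF (pvKeyOf pcs) sights 0 none).map Prod.snd = pvAFind sights pcs := by
  induction pcs with
  | nil =>
    rw [pvSelF_none]
    · rfl
    · intro s _
      simp only [pvKeyOf]
      cases pvClusterOf s <;> simp [PySem.List.index?_eq_none_iff]
  | cons c cs ih =>
    simp only [pvAFind]
    cases hf : pvFindC c sights 0 with
    | some p =>
      rw [pvSelF_zero c cs sights 0 p none (by simp) hf]
      rfl
    | none =>
      have hnc : ∀ s ∈ sights, pvClusterOf s ≠ some c := by
        intro s hs hcl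
        have : ∀ (l : List (List (String × String))) (i : Nat), s ∈ l → pvFindC c l i ≠ none := by
          intro l
          induction l with
          | nil => intro i h; simp at h
          | cons t rest ihl =>
            intro i h
            simp only [pvFindC]
            rcases List.mem_cons.mp h with rfl | h'
            · rw [if_pos hcl]; simp
            · by_cases ht : pvClusterOf t = some c
              · rw [if_pos ht]; simp
              · rw [if_neg ht]
                exact ihl _ h'
        exact this sights 0 hs hf
      have hshift : ∀ s ∈ sights, pvKeyOf (c :: cs) s = (pvKeyOf cs s).map (· + 1) := by
        intro s hs
        simp only [pvKeyOf]
        cases hcl : pvClusterOf s with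
        | none => rfl
        | some v =>
          have hvc : v ≠ c := by
            intro h; exact hnc s hs (h ▸ hcl)
          show PySem.List.index? (c :: cs) v = (PySem.List.index? cs v).map (· + 1)
          rw [PySem.List.index?_cons_of_ne _ (fun h => hvc h.symm)]
      rw [pvSelF_congr _ _ _ _ _ hshift]
      have := pvSelF_shift (pvKeyOf cs) sights 0 none
      simp only [Option.map_none] at this
      rw [this, ← ih]
      cases pvSelF (pvKeyOf cs) sights 0 none <;> rfl

-- ===== VERDICT (by name: the statement is the Claim_ definition above) =====
theorem apply_period_first_stop_bias_py_spec : Claim_equal_apply_period_first_stop_bias_py := by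
  intro os pcs _
  unfold Spec_apply_period_first_stop_bias_py
  unfold apply_period_first_stop_bias_py apply_period_first_stop_bias_py_alt
  by_cases h : os = [] ∨ pcs = []
  · simp [h]
  · simp only [h, if_false]
    rw [pvA_outer_eq, pvB_best_eq_selF]
    have hk : ∀ s ∈ os, (match pvClusterOf s with
        | some v => (pvB_rank pcs 0 PySem.Dict.empty).get? v
        | none => none) = pvKeyOf pcs s := by
      intro s _
      unfold pvKeyOf
      cases pvClusterOf s with
      | none => rfl
      | some v =>
        simp only [pvB_rank_get?, PySem.Dict.get?_empty]
        cases PySem.List.index? pcs v <;> simp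
    rw [pvSelF_congr _ _ _ _ _ hk]
    have := pvMain pcs os
    cases hsel : pvSelF (pvKeyOf pcs) os 0 none with
    | none => rw [hsel] at this; simp at this; rw [← this]
    | some p =>
      rw [hsel] at this
      simp only [Option.map_some] at this
      rw [← this]
      obtain ⟨br, bi⟩ := p
      simp only [pvMove]
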